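-- pv_equiv track=rewrite | github.com/uw-math-ai/quantum-ai | rq2/data/agent_files/select_stabilizers.py | pauli_commutes
-- ===== SOURCE A (Python) =====
-- def pauli_commutes(stab_str, error_set, error_type):
--     # stab_str: "XXII..."
--     # error_set: {0, 1, 2}
--     # error_type: 'X' or 'Z' (all qubits in error_set have this error)
--     # Anti-commute if overlap is odd number of anti-commuting positions.
--     # X and Z anti-commute.
--     # X and X commute. Z and Z commute. I commutes.
--
--     anticommutes = 0
--     for q in error_set:
--         if q >= len(stab_str): continue
--         p = stab_str[q]
--         if p == 'I': continue
--         if error_type == 'X':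
--             if p == 'Z': anticommutes += 1
--         elif error_type == 'Z':
--             if p == 'X': anticommutes += 1
--
--     return (anticommutes % 2) == 0 # Returns True if commutes (undetected)
-- ===== SOURCE B (Python) =====
-- def pauli_commutes(stab_str, error_set, error_type):
--     # Drive one scan over the stabilizer string; error_set is only a membership oracle.
--     if error_type == 'X':
--         tgt = 'Z'
--     elif error_type == 'Z':
--         tgt = 'X'
--     else:
--         return True
--     hits = sum(1 for i, p in enumerate(stab_str) if p == tgt and i in error_set)
--     return hits % 2 == 0
-- ===== Notes on version B (the rewrite author's own statement) =====
-- stated objective: idiomatic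
-- what changed: B precomputes the single anti-commuting target character and drives one enumerate pass over the stabilizer string, using error_set only as a membership oracle, instead of A's per-element loop over the set with an index guard, negative-capable string indexing and a per-element branch ladder.
-- intended difference: On inputs whose error_set contains an odd number of negative qubit indices that Python's negative-index wraparound lands on an anti-commuting character, A flips the commutation parity from the wrapped characters while B ignores the meaningless negative indices; qubit indices are nonnegative, so B's value is the intended one. — e.g. on pauli_commutes("ZZ", [-2], "X"): A returns false, B returns true
import Mathlib
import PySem

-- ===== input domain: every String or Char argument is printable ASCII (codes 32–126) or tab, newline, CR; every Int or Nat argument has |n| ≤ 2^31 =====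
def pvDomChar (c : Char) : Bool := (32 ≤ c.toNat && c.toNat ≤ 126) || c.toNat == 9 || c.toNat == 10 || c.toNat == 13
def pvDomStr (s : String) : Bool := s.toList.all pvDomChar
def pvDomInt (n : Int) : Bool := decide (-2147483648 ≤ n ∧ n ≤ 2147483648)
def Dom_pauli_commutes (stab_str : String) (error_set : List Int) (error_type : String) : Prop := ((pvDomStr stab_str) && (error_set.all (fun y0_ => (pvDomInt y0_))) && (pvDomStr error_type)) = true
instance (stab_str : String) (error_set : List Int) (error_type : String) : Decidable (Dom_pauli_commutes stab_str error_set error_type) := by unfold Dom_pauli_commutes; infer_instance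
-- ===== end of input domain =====

-- B drives one enumerate pass over the stabilizer string with a precomputed target
-- character, querying error_set for membership (idiomatic; same asymptotic cost);
-- B ignores negative indices, where A wraps around the string (see D_ below).

-- ===== PORT A =====
def pauli_commutes (stab_str : String) (error_set : List Int) (error_type : String) : Bool :=
  PySem.Int.mod
    (error_set.foldl (fun acc q =>
      if (stab_str.toList.length : Int) ≤ q then acc
      else
        match PySem.List.pyGet? stab_str.toList q with
        | none => acc      -- Python raises IndexError here (q < -len); such inputs are outside Pre_
        | some p =>
          if p = 'I' then acc
          else if error_type = "X" then (if p = 'Z' then acc + 1 else acc)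
          else if error_type = "Z" then (if p = 'X' then acc + 1 else acc)
          else acc) 0) 2 == 0

-- ===== PORT B =====
-- B-side helper: the number of target characters at positions of error_set
def pvHits (stab_str : String) (error_set : List Int) (t : Char) : Nat :=
  (PySem.List.enumerate stab_str.toList).countP
    (fun ip => ip.2 == t && error_set.contains ip.1)

def pauli_commutes_alt (stab_str : String) (error_set : List Int) (error_type : String) : Bool :=
  if error_type = "X" then pvHits stab_str error_set 'Z' % 2 == 0
  else if error_type = "Z" then pvHits stab_str error_set 'X' % 2 == 0
  else true

-- ===== PRECONDITION & SPEC =====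
-- Pre_ excludes the inputs on which A raises IndexError (some q in error_set below
-- -len(stab_str)) and requires error_set to be duplicate-free, as every list
-- representing A's set-typed argument is.
def Pre_pauli_commutes (stab_str : String) (error_set : List Int) (error_type : String) : Prop :=
  error_set.Nodup ∧ ∀ q ∈ error_set, -(stab_str.toList.length : Int) ≤ q
instance (stab_str : String) (error_set : List Int) (error_type : String) : Decidable (Pre_pauli_commutes stab_str error_set error_type) := by unfold Pre_pauli_commutes; infer_instance

def pvWitness_pauli_commutes : String × List Int × String := ("XZZI", [0, 2], "X")

-- number of negative indices whose Python wraparound lands on an anti-commuting character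
def pvNegCount (stab_str : String) (error_set : List Int) (error_type : String) : Nat :=
  error_set.countP (fun q => decide (q < 0) &&
    (if error_type = "X" then PySem.List.pyGet? stab_str.toList q == some 'Z'
     else if error_type = "Z" then PySem.List.pyGet? stab_str.toList q == some 'X'
     else false))

-- On inputs whose error_set contains an odd number of negative qubit indices that
-- Python's negative-index wraparound lands on an anti-commuting character, A flips the
-- commutation parity from the wrapped characters while B ignores the meaningless
-- negative indices; qubit indices are nonnegative, so B's value is the intended one.
def D_pauli_commutes (stab_str : String) (error_set : List Int) (error_type : String) : Prop :=
  pvNegCount stab_str error_set error_type % 2 = 1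
instance (stab_str : String) (error_set : List Int) (error_type : String) : Decidable (D_pauli_commutes stab_str error_set error_type) := by unfold D_pauli_commutes; infer_instance

def Spec_pauli_commutes (stab_str : String) (error_set : List Int) (error_type : String) (out : Bool) : Prop := ¬ D_pauli_commutes stab_str error_set error_type → out = pauli_commutes_alt stab_str error_set error_type
instance (stab_str : String) (error_set : List Int) (error_type : String) (out : Bool) : Decidable (Spec_pauli_commutes stab_str error_set error_type out) := by unfold Spec_pauli_commutes; infer_instance

def pvDiffWitness_pauli_commutes : String × List Int × String := ("ZZ", [-2], "X")
def pvDiffWitnessOut_pauli_commutes : Bool × Bool := (false, true)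

-- ===== CLAIM (what is proved, stated in full; the proofs are below) =====
def Claim_unchanged_pauli_commutes : Prop := ∀ (stab_str : String) (error_set : List Int) (error_type : String), Dom_pauli_commutes stab_str error_set error_type → Pre_pauli_commutes stab_str error_set error_type → Spec_pauli_commutes stab_str error_set error_type (pauli_commutes stab_str error_set error_type)
def Claim_changed_pauli_commutes : Prop := Dom_pauli_commutes (pvDiffWitness_pauli_commutes.1) (pvDiffWitness_pauli_commutes.2.1) (pvDiffWitness_pauli_commutes.2.2) ∧ Pre_pauli_commutes (pvDiffWitness_pauli_commutes.1) (pvDiffWitness_pauli_commutes.2.1) (pvDiffWitness_pauli_commutes.2.2) ∧ D_pauli_commutes (pvDiffWitness_pauli_commutes.1) (pvDiffWitness_pauli_commutes.2.1) (pvDiffWitness_pauli_commutes.2.2) ∧ pauli_commutes (pvDiffWitness_pauli_commutes.1) (pvDiffWitness_pauli_commutes.2.1) (pvDiffWitness_pauli_commutes.2.2) = pvDiffWitnessOut_pauli_commutes.1 ∧ pauli_commutes_alt (pvDiffWitness_pauli_commutes.1) (pvDiffWitness_pauli_commutes.2.1) (pvDiffWitness_pauli_commutes.2.2) = pvDiffWitnessOut_pauli_commutes.2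 ∧ pvDiffWitnessOut_pauli_commutes.1 ≠ pvDiffWitnessOut_pauli_commutes.2
def Claim_exact_pauli_commutes : Prop := ∀ (stab_str : String) (error_set : List Int) (error_type : String), Dom_pauli_commutes stab_str error_set error_type → Pre_pauli_commutes stab_str error_set error_type → D_pauli_commutes stab_str error_set error_type → pauli_commutes stab_str error_set error_type ≠ pauli_commutes_alt stab_str error_set error_type

-- ===== LEMMAS AND PROOFS =====

-- the per-element test A's loop body increments on
def pvTestA (cs : List Char) (et : String) (q : Int) : Bool :=
  if (cs.length : Int) ≤ q then false
  else
    match PySem.List.pyGet? cs q with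
    | none => false
    | some p =>
      if p = 'I' then false
      else if et = "X" then (if p = 'Z' then true else false)
      else if et = "Z" then (if p = 'X' then true else false)
      else false

-- whether the (possibly negative, Python-style) index q holds the character t
def pvLook (cs : List Char) (t : Char) (q : Int) : Bool :=
  match PySem.List.pyGet? cs q with
  | some p => p == t
  | none => false

theorem pvFoldA (cs : List Char) (et : String) (es : List Int) :
    es.foldl (fun acc q =>
      if (cs.length : Int) ≤ q then acc
      else
        match PySem.List.pyGet? cs q with
        | none => acc
        | some p =>
          if p = 'I' then acc
          else if et = "X" then (if p = 'Z' then acc + 1 else acc)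
          else if et = "Z" then (if p = 'X' then acc + 1 else acc)
          else acc) (0 : Int) = (es.countP (pvTestA cs et) : Int) := by
  have h : ∀ (acc : Int) (q : Int),
      (if (cs.length : Int) ≤ q then acc
      else
        match PySem.List.pyGet? cs q with
        | none => acc
        | some p =>
          if p = 'I' then acc
          else if et = "X" then (if p = 'Z' then acc + 1 else acc)
          else if et = "Z" then (if p = 'X' then acc + 1 else acc)
          else acc) = (if pvTestA cs et q then acc + 1 else acc) := by
    intro acc q
    by_cases h1 : (cs.length : Int) ≤ q
    · simp [pvTestA, h1]
    · simp only [pvTestA, if_neg h1]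
      cases hg : PySem.List.pyGet? cs q with
      | none => rfl
      | some p => split_ifs <;> simp_all
  rw [PySem.List.foldl_congr_mem es _
        (fun acc q => if pvTestA cs et q then acc + 1 else acc) 0
        (fun acc x _ => h acc x),
      PySem.List.foldl_if_add_one]
  simp

theorem pvCountPOrDisjoint {α : Type} (l : List α) (a b : α → Bool)
    (h : ∀ x ∈ l, a x = true → b x = false) :
    l.countP (fun x => a x || b x) = l.countP a + l.countP b := by
  induction l with
  | nil => simp
  | cons x l ih =>
    have hx := h x (by simp)
    have ih' := ih (fun y hy => h y (by simp [hy]))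
    simp only [List.countP_cons]
    cases ha : a x <;> cases hb : b x <;> simp_all <;> omega

theorem pvCountPAndBeq (l : List Int) (Q : Int → Bool) (q : Int) :
    l.countP (fun x => Q x && (x == q)) = if Q q then l.count q else 0 := by
  induction l with
  | nil => simp
  | cons x l ih =>
    simp only [List.countP_cons, List.count_cons, ih]
    by_cases hx : x = q
    · subst hx; cases hq : Q x <;> simp [hq]
    · simp [hx, beq_iff_eq]

theorem pvCountSwap (l es : List Int) (hl : l.Nodup) (hes : es.Nodup) (P : Int → Bool) :
    l.countP (fun x => P x && es.contains x) = es.countP (fun q => l.contains q && P q) := by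
  induction es with
  | nil => simp
  | cons q es ih =>
    obtain ⟨hq, hes'⟩ := List.nodup_cons.mp hes
    have hsplit : l.countP (fun x => P x && (q :: es).contains x)
        = l.countP (fun x => P x && (x == q)) + l.countP (fun x => P x && es.contains x) := by
      have hpred : ∀ x ∈ l, (P x && (q :: es).contains x)
          = ((P x && (x == q)) || (P x && es.contains x)) := by
        intro x _
        rw [List.contains_cons, Bool.and_or_distrib_left]
      rw [List.countP_congr (fun x hx => by rw [hpred x hx])]
      exact pvCountPOrDisjoint l _ _ (by
        intro x _ hax
        have hax' : P x = true ∧ x = q := by simpa using hax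
        obtain ⟨-, rfl⟩ := hax'
        simp [List.contains_eq_mem, hq])
    rw [hsplit, pvCountPAndBeq, List.countP_cons, ih hes']
    have hcount : l.count q = if l.contains q then 1 else 0 := by
      by_cases hm : q ∈ l
      · simp [List.count_eq_one_of_mem hl hm, hm]
      · simp [List.count_eq_zero_of_not_mem hm, hm]
    rw [hcount]
    cases hP : P q <;> cases hc : l.contains q <;> simp_all <;> omega

-- B's enumerate count, as a count over the error set of nonnegative in-range hits
theorem pvEnumCount (cs : List Char) (es : List Int) (t : Char) (hes : es.Nodup) :
    (PySem.List.enumerate cs).countP (fun ip => ip.2 == t && es.contains ip.1)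
      = es.countP (fun q => decide (0 ≤ q) && pvLook cs t q) := by
  rw [PySem.List.enumerate_eq_map_pyRange cs 'I', List.countP_map]
  have h1 : ((PySem.List.pyRange 0 (PySem.List.len cs)).countP
      (((fun ip => ip.2 == t && es.contains ip.1) ∘ fun j => (j, PySem.List.pyGetD cs j 'I'))))
      = (PySem.List.pyRange 0 (PySem.List.len cs)).countP
        (fun j => (PySem.List.pyGetD cs j 'I' == t) && es.contains j) := rfl
  rw [h1, pvCountSwap _ es (PySem.List.nodup_pyRange_one 0 _) hes]
  have hlen : PySem.List.len cs = (cs.length : Int) := by simp [PySem.List.len_eq]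
  have hpt : ∀ q : Int,
      ((PySem.List.pyRange 0 (PySem.List.len cs)).contains q && (PySem.List.pyGetD cs q 'I' == t))
        = (decide (0 ≤ q) && pvLook cs t q) := by
    intro q
    by_cases hin : 0 ≤ q ∧ q < (cs.length : Int)
    · have hmem : q ∈ PySem.List.pyRange 0 (PySem.List.len cs) := by
        rw [hlen]; exact (PySem.List.mem_pyRange_one).mpr ⟨hin.1, hin.2⟩
      have hc : (PySem.List.pyRange 0 (PySem.List.len cs)).contains q = true := by
        simpa [List.contains_eq_mem] using hmem
      have hget : PySem.List.pyGet? cs q = some cs[q.toNat] :=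
        PySem.List.pyGet?_eq_some_getElem cs hin.1 (by omega)
      have hgetD : PySem.List.pyGetD cs q 'I' = cs[q.toNat] := by
        simp [PySem.List.pyGetD, hget]
      simp [hc, hgetD, pvLook, hget, hin.1, hin.2]
    · have hc : (PySem.List.pyRange 0 (PySem.List.len cs)).contains q = false := by
        simp only [List.contains_eq_mem, decide_eq_false_iff_not]
        intro hmem
        rw [hlen] at hmem
        exact hin ((PySem.List.mem_pyRange_one).mp hmem)
      rw [hc]
      by_cases h0 : 0 ≤ q
      · have hq : (cs.length : Int) ≤ q := by omega
        have hnone : PySem.List.pyGet? cs q = none := by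
          rw [PySem.List.pyGet?_eq_none_iff]
          simp [PySem.Raise.InRange]
          omega
        simp [pvLook, hnone]
      · simp [h0]
  exact List.countP_congr (fun q _ => by rw [hpt q])

-- A's per-element test splits into the nonnegative hits (= B's count) and the wrapped
-- negative hits, for a target t ≠ 'I' matching A's branch ladder
theorem pvSplitA (cs : List Char) (es : List Int) (et : String) (t : Char)
    (hI : t ≠ 'I')
    (hladder : ∀ p : Char,
      (if p = 'I' then false
       else if et = "X" then (if p = 'Z' then true else false)
       else if et = "Z" then (if p = 'X' then true else false)
       else false) = (p == t))
    (hlow : ∀ q ∈ es, -(cs.length : Int) ≤ q) :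
    es.countP (pvTestA cs et)
      = es.countP (fun q => decide (0 ≤ q) && pvLook cs t q)
        + es.countP (fun q => decide (q < 0) && pvLook cs t q) := by
  have hpt : ∀ q ∈ es, pvTestA cs et q
      = ((decide (0 ≤ q) && pvLook cs t q) || (decide (q < 0) && pvLook cs t q)) := by
    intro q hq
    have hlo := hlow q hq
    unfold pvTestA pvLook
    by_cases hge : (cs.length : Int) ≤ q
    · have hnone : PySem.List.pyGet? cs q = none := by
        rw [PySem.List.pyGet?_eq_none_iff]
        simp [PySem.Raise.InRange]
        omega
      simp [hge, hnone]
    · rw [if_neg hge]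
      have hinr : PySem.Raise.InRange cs.length q := by
        simp [PySem.Raise.InRange]; omega
      cases h : PySem.List.pyGet? cs q with
      | none =>
        rw [PySem.List.pyGet?_eq_none_iff] at h
        exact absurd hinr h
      | some p =>
        change (if p = 'I' then false
          else if et = "X" then (if p = 'Z' then true else false)
          else if et = "Z" then (if p = 'X' then true else false)
          else false) = ((decide (0 ≤ q) && (p == t)) || (decide (q < 0) && (p == t)))
        rw [hladder p]
        by_cases h0 : 0 ≤ q <;> (simp [h0]; try omega)
  rw [show List.countP (pvTestA cs et) es
      = List.countP (fun q => (decide (0 ≤ q) && pvLook cs t q) || (decide (q < 0) && pvLook cs t q)) es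
    from List.countP_congr (fun q hq => by rw [hpt q hq])]
  exact pvCountPOrDisjoint es _ _ (by
    intro q _ h
    have h0 : 0 ≤ q := by simpa using (Bool.and_eq_true_iff.mp h).1
    have h1 : ¬ q < 0 := by omega
    simp [h1])

theorem pvNegCountX (stab_str : String) (es : List Int) :
    pvNegCount stab_str es "X" = es.countP (fun q => decide (q < 0) && pvLook stab_str.toList 'Z' q) := by
  unfold pvNegCount
  refine List.countP_congr (fun q _ => ?_)
  simp only [if_pos rfl]
  unfold pvLook
  cases PySem.List.pyGet? stab_str.toList q with
  | none => simp
  | some p => simp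

theorem pvNegCountZ (stab_str : String) (es : List Int) :
    pvNegCount stab_str es "Z" = es.countP (fun q => decide (q < 0) && pvLook stab_str.toList 'X' q) := by
  unfold pvNegCount
  refine List.countP_congr (fun q _ => ?_)
  have hXZ : ("Z" : String) ≠ "X" := by decide
  simp only [if_neg hXZ, if_pos rfl]
  unfold pvLook
  cases PySem.List.pyGet? stab_str.toList q with
  | none => simp
  | some p => simp

theorem pvNegCountOther (stab_str : String) (es : List Int) (et : String)
    (hX : et ≠ "X") (hZ : et ≠ "Z") : pvNegCount stab_str es et = 0 := by
  unfold pvNegCount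
  refine List.countP_eq_zero.mpr (fun q _ => ?_)
  simp [hX, hZ]

theorem pvModTwo (c : Nat) : (PySem.Int.mod (c : Int) 2 == 0) = ((c % 2 == 0 : Bool)) := by
  rw [PySem.Int.mod_eq_emod_of_pos (by norm_num)]
  have h2 : ((c : Int) % 2) = ((c % 2 : Nat) : Int) := (Int.natCast_mod c 2).symm
  rw [h2]
  cases h : (c % 2 == 0 : Bool)
  · simp_all
  · simp_all

theorem pvCountZero (stab_str : String) (error_set : List Int) (error_type : String)
    (hX : error_type ≠ "X") (hZ : error_type ≠ "Z") :
    error_set.countP (pvTestA stab_str.toList error_type) = 0 := by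
  refine List.countP_eq_zero.mpr (fun q _ => ?_)
  unfold pvTestA
  split_ifs with h1
  · simp
  · cases PySem.List.pyGet? stab_str.toList q with
    | none => simp
    | some p => simp [hX, hZ]

-- ===== VERDICT (by name: the statement is the Claim_ definition above) =====
theorem pauli_commutes_spec : Claim_unchanged_pauli_commutes := by
  intro stab_str error_set error_type _ hpre
  obtain ⟨hnd, hlow⟩ := hpre
  unfold Spec_pauli_commutes
  intro hD
  unfold pauli_commutes pauli_commutes_alt pvHits
  rw [pvFoldA]
  by_cases hX : error_type = "X"
  · subst hX
    rw [if_pos rfl]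
    rw [pvSplitA stab_str.toList error_set "X" 'Z' (by decide)
        (by intro p; by_cases h1 : p = 'I' <;> by_cases h2 : p = 'Z' <;> simp_all) hlow,
      pvEnumCount stab_str.toList error_set 'Z' hnd, pvModTwo]
    have hN : error_set.countP (fun q => decide (q < 0) && pvLook stab_str.toList 'Z' q) % 2 = 0 := by
      unfold D_pauli_commutes at hD
      rw [pvNegCountX] at hD
      omega
    have : (error_set.countP (fun q => decide (0 ≤ q) && pvLook stab_str.toList 'Z' q)
          + error_set.countP (fun q => decide (q < 0) && pvLook stab_str.toList 'Z' q)) % 2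
        = (error_set.countP (fun q => decide (0 ≤ q) && pvLook stab_str.toList 'Z' q)) % 2 := by
      omega
    rw [this]
  · by_cases hZ : error_type = "Z"
    · subst hZ
      rw [if_neg hX, if_pos rfl]
      rw [pvSplitA stab_str.toList error_set "Z" 'X' (by decide)
          (by intro p; by_cases h1 : p = 'I' <;> by_cases h2 : p = 'X' <;> simp_all) hlow,
        pvEnumCount stab_str.toList error_set 'X' hnd, pvModTwo]
      have hN : error_set.countP (fun q => decide (q < 0) && pvLook stab_str.toList 'X' q) % 2 = 0 := by
        unfold D_pauli_commutes at hD
        rw [pvNegCountZ] at hD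
        omega
      have : (error_set.countP (fun q => decide (0 ≤ q) && pvLook stab_str.toList 'X' q)
            + error_set.countP (fun q => decide (q < 0) && pvLook stab_str.toList 'X' q)) % 2
          = (error_set.countP (fun q => decide (0 ≤ q) && pvLook stab_str.toList 'X' q)) % 2 := by
        omega
      rw [this]
    · rw [if_neg hX, if_neg hZ]
      rw [pvCountZero stab_str error_set error_type hX hZ]
      decide

theorem pauli_commutes_changed : Claim_changed_pauli_commutes := by
  unfold Claim_changed_pauli_commutes; decide

theorem pauli_commutes_tight : Claim_exact_pauli_commutes := by
  intro stab_str error_set error_type _ hpre hD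
  obtain ⟨hnd, hlow⟩ := hpre
  unfold pauli_commutes pauli_commutes_alt pvHits
  rw [pvFoldA]
  by_cases hX : error_type = "X"
  · subst hX
    rw [if_pos rfl]
    rw [pvSplitA stab_str.toList error_set "X" 'Z' (by decide)
        (by intro p; by_cases h1 : p = 'I' <;> by_cases h2 : p = 'Z' <;> simp_all) hlow,
      pvEnumCount stab_str.toList error_set 'Z' hnd, pvModTwo]
    have hN : error_set.countP (fun q => decide (q < 0) && pvLook stab_str.toList 'Z' q) % 2 = 1 := by
      unfold D_pauli_commutes at hD
      rw [pvNegCountX] at hD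
      omega
    by_cases hb : error_set.countP (fun q => decide (0 ≤ q) && pvLook stab_str.toList 'Z' q) % 2 = 0
    · simp [Nat.add_mod, hb, hN]
    · simp [Nat.add_mod, hb, hN]
      omega
  · by_cases hZ : error_type = "Z"
    · subst hZ
      rw [if_neg hX, if_pos rfl]
      rw [pvSplitA stab_str.toList error_set "Z" 'X' (by decide)
          (by intro p; by_cases h1 : p = 'I' <;> by_cases h2 : p = 'X' <;> simp_all) hlow,
        pvEnumCount stab_str.toList error_set 'X' hnd, pvModTwo]
      have hN : error_set.countP (fun q => decide (q < 0) && pvLook stab_str.toList 'X' q) % 2 = 1 := by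
        unfold D_pauli_commutes at hD
        rw [pvNegCountZ] at hD
        omega
      by_cases hb : error_set.countP (fun q => decide (0 ≤ q) && pvLook stab_str.toList 'X' q) % 2 = 0
      · simp [Nat.add_mod, hb, hN]
      · simp [Nat.add_mod, hb, hN]
        omega
    · exfalso
      unfold D_pauli_commutes at hD
      rw [pvNegCountOther stab_str error_set error_type hX hZ] at hD
      omega
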